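-- pv_equiv track=rewrite | github.com/Chappetm/red-sands-script | scripts/1-parser.py | detect_supplier
-- ===== SOURCE A (Python) =====
-- def detect_supplier(product_codes, product_db):
--     matches = {supplier: 0 for supplier in product_db.keys()}
--     for code in product_codes:
--         for supplier, codes_set in product_db.items():
--             if code in codes_set:
--                 matches[supplier] += 1
--     best_match = max(matches, key=matches.get)
--     if matches[best_match] > 0:
--         return best_match
--     return None
-- ===== SOURCE B (Python) =====
-- def detect_supplier(product_codes, product_db):
--     index = {}
--     for supplier, codes in product_db.items():
--         for code in dict.fromkeys(codes):
--             index.setdefault(code, []).append(supplier)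
--     counts = {supplier: 0 for supplier in product_db}
--     for code in product_codes:
--         for supplier in index.get(code, ()):
--             counts[supplier] += 1
--     best, best_count = None, 0
--     for supplier, count in counts.items():
--         if count > best_count:
--             best, best_count = supplier, count
--     return best
-- ===== Notes on version B (the rewrite author's own statement) =====
-- stated objective: faster
-- what changed: B precomputes a reverse index code->suppliers once and increments only the suppliers that actually match each code, then picks the best supplier in a single strict-greater scan, instead of A's nested scan of every supplier's code list for every product code.
-- crash fix: On an empty product_db A raises ValueError (max() of an empty sequence) while B naturally returns None. — e.g. on detect_supplier(["a"], []): A raises ValueError, B returns none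
import Mathlib
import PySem

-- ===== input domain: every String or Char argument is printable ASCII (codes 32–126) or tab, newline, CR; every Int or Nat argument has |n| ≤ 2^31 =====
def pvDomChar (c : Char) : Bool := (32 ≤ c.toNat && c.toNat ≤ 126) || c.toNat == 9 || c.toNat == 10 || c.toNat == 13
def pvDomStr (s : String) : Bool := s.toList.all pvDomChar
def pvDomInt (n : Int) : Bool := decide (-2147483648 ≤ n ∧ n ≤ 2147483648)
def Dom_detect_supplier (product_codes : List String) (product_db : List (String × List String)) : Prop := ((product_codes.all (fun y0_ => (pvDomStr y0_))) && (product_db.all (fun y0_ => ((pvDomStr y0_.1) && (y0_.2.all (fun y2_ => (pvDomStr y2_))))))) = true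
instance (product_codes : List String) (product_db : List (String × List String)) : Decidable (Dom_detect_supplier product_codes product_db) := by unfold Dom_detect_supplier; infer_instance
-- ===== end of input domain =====

-- B replaces A's nested supplier scan per code by a precomputed reverse index code->suppliers
-- plus a single best-count scan (measurably faster, asymptotic change).


-- ===== PORT A =====
def detect_supplier (product_codes : List String) (product_db : List (String × List String)) : Option String :=
  let d := PySem.Dict.ofList product_db
  -- matches = {supplier: 0 for supplier in product_db.keys()}
  let ms : PySem.Dict String Int := d.keys.foldl (fun m s => m.insert s 0) PySem.Dict.empty
  -- for code in product_codes: for supplier, codes_set in product_db.items(): if code in codes_set: matches[supplier] += 1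
  let ms := product_codes.foldl (fun m code =>
      d.items.foldl (fun m p => if p.2.contains code then m.modify p.1 0 (· + 1) else m) m) ms
  -- best_match = max(ms, key=ms.get)  (raises ValueError on an empty dict: Pre_ excludes [])
  match PySem.List.max? ms.keys (fun s => ms.getD s 0) with
  | none => none
  | some best => if ms.getD best 0 > 0 then some best else none

-- ===== PORT B =====
def detect_supplier_alt (product_codes : List String) (product_db : List (String × List String)) : Option String :=
  let d := PySem.Dict.ofList product_db
  -- index = {}; for supplier, codes in product_db.items(): for code in dict.fromkeys(codes): index.setdefault(code, []).append(supplier)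
  let index : PySem.Dict String (List String) := d.items.foldl (fun idx p =>
      (PySem.List.dedup p.2).foldl (fun idx code => idx.modify code [] (· ++ [p.1])) idx) PySem.Dict.empty
  -- counts = {supplier: 0 for supplier in product_db}
  let counts : PySem.Dict String Int := d.keys.foldl (fun m s => m.insert s 0) PySem.Dict.empty
  -- for code in product_codes: for supplier in index.get(code, ()): counts[supplier] += 1
  let counts := product_codes.foldl (fun m code =>
      (index.getD code []).foldl (fun m s => m.modify s 0 (· + 1)) m) counts
  -- best, best_count = None, 0; for supplier, count in counts.items(): if count > best_count: …
  (counts.items.foldl (fun bc p => if bc.2 < p.2 then (some p.1, p.2) else bc)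
    ((none : Option String), (0 : Int))).1

-- ===== PRECONDITION & SPEC =====
-- A raises ValueError (max() of an empty sequence) exactly when product_db is empty.
def Pre_detect_supplier (product_codes : List String) (product_db : List (String × List String)) : Prop := product_db ≠ []
instance (product_codes : List String) (product_db : List (String × List String)) : Decidable (Pre_detect_supplier product_codes product_db) := by unfold Pre_detect_supplier; infer_instance
def pvWitness_detect_supplier : List String × (List (String × List String)) := (["a"], [("s", ["a", "b"])])

-- On an empty product_db A raises ValueError (max() of an empty sequence) while B naturally returns None.
def Raises_detect_supplier (product_codes : List String) (product_db : List (String × List String)) : Prop := product_db = []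
instance (product_codes : List String) (product_db : List (String × List String)) : Decidable (Raises_detect_supplier product_codes product_db) := by unfold Raises_detect_supplier; infer_instance
def pvRaiseWitness_detect_supplier : List String × (List (String × List String)) := (["a"], [])
def pvRaiseWitnessOut_detect_supplier : Option String := none

def Spec_detect_supplier (product_codes : List String) (product_db : List (String × List String)) (out : Option String) : Prop := out = detect_supplier_alt product_codes product_db
instance (product_codes : List String) (product_db : List (String × List String)) (out : Option String) : Decidable (Spec_detect_supplier product_codes product_db out) := by unfold Spec_detect_supplier; infer_instance

-- ===== CLAIM (what is proved, stated in full; the proofs are below) =====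
def Claim_equal_detect_supplier : Prop := ∀ (product_codes : List String) (product_db : List (String × List String)), Dom_detect_supplier product_codes product_db → Pre_detect_supplier product_codes product_db → Spec_detect_supplier product_codes product_db (detect_supplier product_codes product_db)
def Claim_raises_detect_supplier : Prop := (∀ (product_codes : List String) (product_db : List (String × List String)), Dom_detect_supplier product_codes product_db → Raises_detect_supplier product_codes product_db → ¬ Pre_detect_supplier product_codes product_db) ∧ (Dom_detect_supplier (pvRaiseWitness_detect_supplier.1) (pvRaiseWitness_detect_supplier.2) ∧ Raises_detect_supplier (pvRaiseWitness_detect_supplier.1) (pvRaiseWitness_detect_supplier.2) ∧ detect_supplier_alt (pvRaiseWitness_detect_supplier.1) (pvRaiseWitness_detect_supplier.2) = pvRaiseWitnessOut_detect_supplier)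


-- ===== LEMMAS AND PROOFS =====

-- number of codes in pcs that occur in v
def pvCnt (pcs : List String) (v : List String) : Int :=
  ((pcs.filter (fun c => v.contains c)).length : Int)

theorem pv_cnt_nonneg (pcs v : List String) : 0 ≤ pvCnt pcs v := by
  unfold pvCnt; positivity

theorem pv_cnt_cons (c : String) (pcs v : List String) :
    pvCnt (c :: pcs) v = (if v.contains c then 1 else 0) + pvCnt pcs v := by
  unfold pvCnt
  by_cases h : c ∈ v
  · have hc : v.contains c = true := by simpa using h
    simp only [List.filter_cons, hc, if_true, List.length_cons]
    push_cast; ring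
  · have hc : v.contains c = false := by simpa using h
    simp [h]

-- the zero-initialisation loop: every getD is 0
theorem pv_init_getD (ks : List String) (m : PySem.Dict String Int)
    (h : ∀ s, m.getD s 0 = 0) :
    ∀ s, (ks.foldl (fun m s => m.insert s 0) m).getD s 0 = 0 := by
  induction ks generalizing m with
  | nil => simpa using h
  | cons k t ih =>
      intro s
      simp only [List.foldl_cons]
      exact ih (m.insert k 0) (fun s => by
        rw [PySem.Dict.getD_insert]; split <;> simp [h]) s

theorem pv_init_keys (ks : List String) (hk : ks.Nodup) :
    (ks.foldl (fun m s => m.insert s (0 : Int)) PySem.Dict.empty).keys = ks := by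
  have := PySem.Dict.keys_foldl_insert ks (fun _ _ => (0 : Int)) PySem.Dict.empty
  simpa [PySem.Set.update_nil_left, PySem.Set.ofList_eq_self_of_nodup ks hk] using this

-- A's inner supplier scan, value at any key
theorem pv_LA1 (ks : List String) (hk : ks.Nodup) (P : String → Bool)
    (m : PySem.Dict String Int) (s : String) :
    (ks.foldl (fun m k => if P k then m.modify k 0 (· + 1) else m) m).getD s 0
      = m.getD s 0 + (if s ∈ ks ∧ P s = true then 1 else 0) := by
  induction ks generalizing m with
  | nil => simp
  | cons k t ih =>
      have hkt : k ∉ t := (List.nodup_cons.mp hk).1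
      have ht : t.Nodup := (List.nodup_cons.mp hk).2
      simp only [List.foldl_cons]
      by_cases hP : P k
      · simp only [hP, if_true]
        rw [ih ht, PySem.Dict.getD_modify]
        by_cases hsk : s = k
        · subst hsk; simp [hkt, hP]
        · simp [hsk]
      · simp only [hP]
        rw [ih ht]
        by_cases hsk : s = k
        · subst hsk; simp [hkt, hP]
        · simp [hsk]

-- A's inner scan preserves the key list when it only touches existing keys
theorem pv_keysA1 (l : List String) (P : String → Bool) (m : PySem.Dict String Int)
    (h : ∀ k ∈ l, k ∈ m.keys) :
    (l.foldl (fun m k => if P k then m.modify k 0 (· + 1) else m) m).keys = m.keys := by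
  induction l generalizing m with
  | nil => simp
  | cons k t ih =>
      simp only [List.foldl_cons]
      by_cases hP : P k
      · simp only [hP, if_true]
        have hc : m.contains k = true :=
          (PySem.Dict.contains_iff_mem_keys m k).mpr (h k (by simp))
        have hkeys : (m.modify k 0 (· + 1)).keys = m.keys := by
          rw [PySem.Dict.keys_modify]
          exact PySem.Dict.keys_insert_of_contains m _ hc
        rw [ih _ (by intro x hx; rw [hkeys]; exact h x (by simp [hx]))]
        exact hkeys
      · simp only [hP]
        exact ih m (fun x hx => h x (by simp [hx]))

-- A's counting loop over the product codes
theorem pv_LA2 (g : String → List String) (ks : List String) (hk : ks.Nodup)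
    (pcs : List String) (m : PySem.Dict String Int) (s : String) :
    (pcs.foldl (fun m code =>
        ks.foldl (fun m k => if (g k).contains code then m.modify k 0 (· + 1) else m) m) m).getD s 0
      = m.getD s 0 + (if s ∈ ks then pvCnt pcs (g s) else 0) := by
  induction pcs generalizing m with
  | nil => simp [pvCnt]
  | cons c t ih =>
      simp only [List.foldl_cons]
      rw [ih, pv_LA1 ks hk (fun k => (g k).contains c) m s, pv_cnt_cons]
      by_cases hs : s ∈ ks
      · simp only [hs, true_and, if_true]
        by_cases hc : (g s).contains c <;> simp [hc] <;> omega
      · simp [hs]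

theorem pv_keysA2 (g : String → List String) (ks : List String)
    (pcs : List String) (m : PySem.Dict String Int)
    (h : ∀ k ∈ ks, k ∈ m.keys) :
    (pcs.foldl (fun m code =>
        ks.foldl (fun m k => if (g k).contains code then m.modify k 0 (· + 1) else m) m) m).keys
      = m.keys := by
  induction pcs generalizing m with
  | nil => rfl
  | cons c t ih =>
      simp only [List.foldl_cons]
      have hkeys := pv_keysA1 ks (fun k => (g k).contains c) m h
      rw [ih _ (by intro x hx; rw [hkeys]; exact h x hx)]
      exact hkeys

-- B's index construction: inner loop over one supplier's (deduped) codes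
theorem pv_LB1 (cs : List String) (hc : cs.Nodup) (k : String)
    (idx : PySem.Dict String (List String)) (code : String) :
    (cs.foldl (fun idx c => idx.modify c [] (· ++ [k])) idx).getD code []
      = idx.getD code [] ++ (if code ∈ cs then [k] else []) := by
  induction cs generalizing idx with
  | nil => simp
  | cons c t ih =>
      have hct : c ∉ t := (List.nodup_cons.mp hc).1
      have ht : t.Nodup := (List.nodup_cons.mp hc).2
      simp only [List.foldl_cons]
      rw [ih ht, PySem.Dict.getD_modify]
      by_cases hcc : code = c
      · subst hcc; simp [hct]
      · simp [hcc]

-- B's index: the supplier list stored under each code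
theorem pv_LB2 (g : String → List String) (ks : List String)
    (idx : PySem.Dict String (List String)) (code : String) :
    (ks.foldl (fun idx k =>
        (PySem.List.dedup (g k)).foldl (fun idx c => idx.modify c [] (· ++ [k])) idx) idx).getD code []
      = idx.getD code [] ++ ks.filter (fun k => (g k).contains code) := by
  induction ks generalizing idx with
  | nil => simp
  | cons k t ih =>
      simp only [List.foldl_cons]
      rw [ih, pv_LB1 _ (PySem.List.nodup_dedup (g k)) k idx code]
      by_cases hck : code ∈ g k <;> simp [hck]

-- count of an element in a filtered nodup list
theorem pv_count_filter_nodup (ks : List String) (hk : ks.Nodup) (P : String → Bool) (s : String) :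
    (ks.filter P).count s = if s ∈ ks ∧ P s = true then 1 else 0 := by
  induction ks with
  | nil => simp
  | cons k t ih =>
      have hkt : k ∉ t := (List.nodup_cons.mp hk).1
      have ht : t.Nodup := (List.nodup_cons.mp hk).2
      rw [List.filter_cons]
      by_cases hPk : P k
      · simp only [hPk, if_true]
        by_cases hsk : s = k
        · subst hsk
          rw [List.count_cons_self, ih ht]
          simp [hkt, hPk]
        · rw [List.count_cons_of_ne (fun h => hsk h.symm), ih ht]
          simp [hsk]
      · rw [if_neg (by simp [hPk]), ih ht]
        by_cases hsk : s = k
        · subst hsk; simp [hPk]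
        · simp [hsk]

-- B's counting loop over the product codes
theorem pv_LB4 (g : String → List String) (ks : List String) (hk : ks.Nodup)
    (pcs : List String) (m : PySem.Dict String Int) (s : String) :
    (pcs.foldl (fun m code =>
        (ks.filter (fun k => (g k).contains code)).foldl (fun m s => m.modify s 0 (· + 1)) m) m).getD s 0
      = m.getD s 0 + (if s ∈ ks then pvCnt pcs (g s) else 0) := by
  induction pcs generalizing m with
  | nil => simp [pvCnt]
  | cons c t ih =>
      simp only [List.foldl_cons]
      rw [ih, PySem.Dict.getD_foldl_modify_add_one,
        pv_count_filter_nodup ks hk _ s, pv_cnt_cons]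
      by_cases hs : s ∈ ks
      · simp only [hs, true_and, if_true]
        by_cases hc : (g s).contains c <;> simp [hc] <;> omega
      · simp [hs]

-- B's counting loop preserves the key list
theorem pv_keysB1 (l : List String) (m : PySem.Dict String Int)
    (h : ∀ k ∈ l, k ∈ m.keys) :
    (l.foldl (fun m s => m.modify s 0 (· + 1)) m).keys = m.keys := by
  induction l generalizing m with
  | nil => rfl
  | cons k t ih =>
      simp only [List.foldl_cons]
      have hc : m.contains k = true :=
        (PySem.Dict.contains_iff_mem_keys m k).mpr (h k (by simp))
      have hkeys : (m.modify k 0 (· + 1)).keys = m.keys := by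
        rw [PySem.Dict.keys_modify]
        exact PySem.Dict.keys_insert_of_contains m _ hc
      rw [ih _ (by intro x hx; rw [hkeys]; exact h x (by simp [hx]))]
      exact hkeys

theorem pv_keysB (pcs : List String) (sel : String → List String)
    (m : PySem.Dict String Int)
    (h : ∀ code, ∀ k ∈ sel code, k ∈ m.keys) :
    (pcs.foldl (fun m code => (sel code).foldl (fun m s => m.modify s 0 (· + 1)) m) m).keys
      = m.keys := by
  induction pcs generalizing m with
  | nil => rfl
  | cons c t ih =>
      simp only [List.foldl_cons]
      have hkeys := pv_keysB1 (sel c) m (h c)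
      rw [ih _ (by intro code x hx; rw [hkeys]; exact h code x hx)]
      exact hkeys

-- the prefix-maximum fold of Python's max over an option accumulator
theorem pv_max_some (f : String → Int) (t : List String) (m0 : String) :
    t.foldl (fun acc x => PySem.List.min2?.match_1 (fun _ => Option String) acc
        (fun _ => some x) (fun m => if f m < f x then some x else some m)) (some m0)
      = some (t.foldl (fun m k => if f m < f k then k else m) m0) := by
  induction t generalizing m0 with
  | nil => rfl
  | cons k t ih =>
      simp only [List.foldl_cons]
      by_cases h : f m0 < f k <;> simp [h, ih]

-- the invariant connecting A's first-maximum with B's strict-greater scan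
theorem pv_SEL_aux (f : String → Int) (t : List String)
    (m0 : String) (bc : Option String × Int)
    (hR : (0 < f m0 ∧ bc = (some m0, f m0)) ∨ (f m0 = 0 ∧ bc = (none, 0))) :
    (0 < f (t.foldl (fun m k => if f m < f k then k else m) m0) ∧
        t.foldl (fun bc k => if bc.2 < f k then (some k, f k) else bc) bc
          = (some (t.foldl (fun m k => if f m < f k then k else m) m0),
             f (t.foldl (fun m k => if f m < f k then k else m) m0)))
      ∨ (f (t.foldl (fun m k => if f m < f k then k else m) m0) = 0 ∧
          t.foldl (fun bc k => if bc.2 < f k then (some k, f k) else bc) bc = (none, 0)) := by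
  induction t generalizing m0 bc with
  | nil => exact hR
  | cons k t ih =>
      simp only [List.foldl_cons]
      rcases hR with ⟨hpos, rfl⟩ | ⟨hz, rfl⟩
      · by_cases h : f m0 < f k
        · simp only [h, if_true]
          exact ih k (some k, f k) (Or.inl ⟨lt_trans hpos h, rfl⟩)
        · simp only [h, if_false]
          exact ih m0 (some m0, f m0) (Or.inl ⟨hpos, rfl⟩)
      · rw [hz]
        by_cases h : (0 : Int) < f k
        · simp only [h, if_true]
          exact ih k (some k, f k) (Or.inl ⟨h, rfl⟩)
        · simp only [h, if_false]
          exact ih m0 (none, 0) (Or.inr ⟨hz, rfl⟩)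

-- selection equivalence: B's scan equals A's max-then-threshold
theorem pv_SEL (ks : List String) (f : String → Int) (hf : ∀ k, 0 ≤ f k) :
    (ks.foldl (fun bc k => if bc.2 < f k then (some k, f k) else bc)
        ((none : Option String), (0 : Int))).1
      = (match PySem.List.max? ks f with
          | none => none
          | some best => if f best > 0 then some best else none) := by
  cases ks with
  | nil => rfl
  | cons x t =>
      simp only [PySem.List.max?, List.foldl_cons]
      rw [pv_max_some]
      have hstart : (0 < f x ∧ (if (0:Int) < f x then (some x, f x) else ((none : Option String), (0:Int))) = (some x, f x)) ∨
          (f x = 0 ∧ (if (0:Int) < f x then (some x, f x) else ((none : Option String), (0:Int))) = (none, 0)) := by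
        by_cases h : (0 : Int) < f x
        · exact Or.inl ⟨h, by simp [h]⟩
        · exact Or.inr ⟨le_antisymm (not_lt.mp h) (hf x), by simp [h]⟩
      rcases pv_SEL_aux f t x _ hstart with ⟨hpos, heq⟩ | ⟨hz, heq⟩
      · rw [heq]
        dsimp only
        rw [if_pos hpos]
      · rw [heq]
        dsimp only
        rw [if_neg (by omega)]

-- ===== VERDICT (by name: the statement is the Claim_ definition above) =====
theorem detect_supplier_spec : Claim_equal_detect_supplier := by
  intro pcs db _hdom _hpre
  unfold Spec_detect_supplier
  simp only [detect_supplier, detect_supplier_alt]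
  have hnd : (PySem.Dict.ofList db).keys.Nodup := PySem.Dict.nodup_keys_ofList db
  generalize hdd : PySem.Dict.ofList db = d at *
  have hitems : d.items = d.keys.map (fun k => (k, d.getD k [])) :=
    PySem.Dict.items_eq_map_keys d hnd []
  simp only [hitems, List.foldl_map]
  -- name the pieces
  set initD := List.foldl (fun m s => m.insert s (0:Int)) PySem.Dict.empty d.keys with hinitD
  have hkinit : initD.keys = d.keys := pv_init_keys d.keys hnd
  have hginit : ∀ s, initD.getD s 0 = 0 :=
    pv_init_getD d.keys PySem.Dict.empty (fun s => by simp)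
  have hidx : ∀ code, (List.foldl (fun x y => List.foldl (fun idx code => idx.modify code [] fun x => x ++ [y]) x (PySem.List.dedup (d.getD y []))) PySem.Dict.empty d.keys).getD code []
      = List.filter (fun k => (d.getD k []).contains code) d.keys := by
    intro code
    have := pv_LB2 (fun k => d.getD k []) d.keys PySem.Dict.empty code
    simpa using this
  simp only [hidx]
  set AC := List.foldl (fun m code => List.foldl (fun x y => if (d.getD y []).contains code = true then x.modify y 0 fun x => x + 1 else x) m d.keys) initD pcs with hAC
  set BC := List.foldl (fun m code => List.foldl (fun m s => m.modify s 0 fun x => x + 1) m (List.filter (fun k => (d.getD k []).contains code) d.keys)) initD pcs with hBC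
  set F : String → Int := fun s => if s ∈ d.keys then pvCnt pcs (d.getD s []) else 0 with hF
  have hFnn : ∀ s, 0 ≤ F s := by
    intro s; rw [hF]; dsimp only; split
    · exact pv_cnt_nonneg _ _
    · exact le_refl 0
  have hA : ∀ s, AC.getD s 0 = F s := by
    intro s
    rw [hAC, pv_LA2 (fun k => d.getD k []) d.keys hnd pcs initD s, hginit s, hF]
    simp
  have hAkeys : AC.keys = d.keys := by
    rw [hAC, pv_keysA2 (fun k => d.getD k []) d.keys pcs initD
      (by intro k hk; rw [hkinit]; exact hk), hkinit]
  have hB : ∀ s, BC.getD s 0 = F s := by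
    intro s
    rw [hBC, pv_LB4 (fun k => d.getD k []) d.keys hnd pcs initD s, hginit s, hF]
    simp
  have hBkeys : BC.keys = d.keys := by
    rw [hBC, pv_keysB pcs _ initD
      (by intro code k hk; rw [hkinit]; exact (List.mem_filter.mp hk).1), hkinit]
  have hBitems : BC.items = d.keys.map (fun k => (k, F k)) := by
    rw [PySem.Dict.items_eq_map_keys BC (by rw [hBkeys]; exact hnd) 0, hBkeys]
    exact List.map_congr_left (fun k _ => by rw [hB k])
  rw [hBitems, List.foldl_map, hAkeys]
  have hAfun : (fun s => AC.getD s 0) = F := funext hA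
  rw [hAfun]
  simp only [hA]
  rw [pv_SEL d.keys F hFnn]
def detect_supplier_raises : Claim_raises_detect_supplier := by
  unfold Claim_raises_detect_supplier; exact ⟨by intro _ _ _ h hp; exact hp h, by decide⟩
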